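-- pv_equiv track=rewrite | github.com/katarzynaochnikdu/medidesk-lead-processor | nip_finder/orchestrator.py | _prioritize_urls
-- ===== SOURCE A (Python) =====
-- def _prioritize_urls(urls: list[str]) -> list[str]:
--     """
--     Priorytetyzuje URL wedlug prawdopodobienstwa znalezienia NIP.
--
--     Priority (od najwyzszego):
--     1. Zrodla KRS (okredo, krs-online, bizraport) - 95% szans
--     2. /polityka-prywatnosci, /rodo - 90% szans
--     3. /kontakt, /o-nas - 70% szans
--     """
--     # Tier 1: KRS and business registries (highest priority)
--     krs_domains = [
--         "okredo.com",
--         "krs-online.com",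
--         "bizraport.pl",
--         "krs-pobierz.pl",
--         "rejestr.io",
--         "aleo.com",
--         "infoveriti.pl",
--     ]
--
--     # Tier 2: Privacy/RODO pages
--     privacy_keywords = [
--         "/polityka-prywatnosci",
--         "/polityka-prywatności",
--         "/privacy-policy",
--         "/rodo",
--     ]
--
--     # Tier 3: Contact/About pages
--     contact_keywords = [
--         "/kontakt",
--         "/contact",
--         "/o-nas",
--         "/about",
--     ]
--
--     tier1 = []  # KRS sources
--     tier2 = []  # Privacy pages
--     tier3 = []  # Contact pages
--     remaining = []
--
--     for url in urls:
--         url_lower = url.lower()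
--
--         # Check KRS domains first
--         if any(domain in url_lower for domain in krs_domains):
--             tier1.append(url)
--         elif any(kw in url_lower for kw in privacy_keywords):
--             tier2.append(url)
--         elif any(kw in url_lower for kw in contact_keywords):
--             tier3.append(url)
--         else:
--             remaining.append(url)
--
--     return tier1 + tier2 + tier3 + remaining
-- ===== SOURCE B (Python) =====
-- _KRS_DOMAINS = [
--     "okredo.com",
--     "krs-online.com",
--     "bizraport.pl",
--     "krs-pobierz.pl",
--     "rejestr.io",
--     "aleo.com",
--     "infoveriti.pl",
-- ]
--
-- _PRIVACY_KEYWORDS = [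
--     "/polityka-prywatnosci",
--     "/polityka-prywatno\u015bci",
--     "/privacy-policy",
--     "/rodo",
-- ]
--
-- _CONTACT_KEYWORDS = [
--     "/kontakt",
--     "/contact",
--     "/o-nas",
--     "/about",
-- ]
--
--
-- def _rank(url: str) -> int:
--     u = url.lower()
--     if any(d in u for d in _KRS_DOMAINS):
--         return 0
--     if any(kw in u for kw in _PRIVACY_KEYWORDS):
--         return 1
--     if any(kw in u for kw in _CONTACT_KEYWORDS):
--         return 2
--     return 3
--
--
-- def _prioritize_urls(urls: list[str]) -> list[str]:
--     return sorted(urls, key=_rank)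
-- ===== Notes on version B (the rewrite author's own statement) =====
-- stated objective: simpler
-- what changed: Replaced the four explicit bucket lists and their concatenation with a single stable sort by a tier-rank key function (sorted(urls, key=_rank)), relying on sort stability to preserve intra-tier order.
import Mathlib
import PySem

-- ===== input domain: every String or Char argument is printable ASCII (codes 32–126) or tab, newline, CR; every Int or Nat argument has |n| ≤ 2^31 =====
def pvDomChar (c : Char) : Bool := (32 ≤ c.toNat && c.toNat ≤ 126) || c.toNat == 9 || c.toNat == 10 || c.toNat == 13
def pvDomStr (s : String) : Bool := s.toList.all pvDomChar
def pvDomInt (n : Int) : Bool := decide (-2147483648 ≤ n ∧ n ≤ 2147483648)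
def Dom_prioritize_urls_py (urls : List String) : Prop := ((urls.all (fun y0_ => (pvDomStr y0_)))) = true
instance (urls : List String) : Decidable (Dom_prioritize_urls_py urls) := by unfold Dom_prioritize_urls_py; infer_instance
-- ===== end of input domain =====

-- B replaces A's four explicit bucket lists + concatenation by one stable sort on a tier-rank key
-- (same precedence of checks; Python's stable sort preserves intra-tier order). Objective: simpler.

-- ===== PORT A =====
-- the three constant keyword lists of the Python source (shared data, used by both ports)
def pvKrsDomains : List String :=
  ["okredo.com", "krs-online.com", "bizraport.pl", "krs-pobierz.pl",
   "rejestr.io", "aleo.com", "infoveriti.pl"]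

def pvPrivacyKeywords : List String :=
  ["/polityka-prywatnosci", "/polityka-prywatności", "/privacy-policy", "/rodo"]

def pvContactKeywords : List String :=
  ["/kontakt", "/contact", "/o-nas", "/about"]

-- one iteration of A's loop over (tier1, tier2, tier3, remaining)
def pvAStep (st : List String × List String × List String × List String) (url : String) :
    List String × List String × List String × List String :=
  let url_lower := PySem.Str.lower url
  if pvKrsDomains.any (fun d => PySem.Str.isIn d url_lower) then
    (st.1 ++ [url], st.2.1, st.2.2.1, st.2.2.2)
  else if pvPrivacyKeywords.any (fun kw => PySem.Str.isIn kw url_lower) then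
    (st.1, st.2.1 ++ [url], st.2.2.1, st.2.2.2)
  else if pvContactKeywords.any (fun kw => PySem.Str.isIn kw url_lower) then
    (st.1, st.2.1, st.2.2.1 ++ [url], st.2.2.2)
  else
    (st.1, st.2.1, st.2.2.1, st.2.2.2 ++ [url])

def prioritize_urls_py (urls : List String) : List String :=
  let res := urls.foldl pvAStep ([], [], [], [])
  res.1 ++ res.2.1 ++ res.2.2.1 ++ res.2.2.2

-- ===== PORT B =====
-- B's _rank helper: first-matching tier of a URL (0 = KRS, 1 = privacy, 2 = contact, 3 = rest)
def pvRank (url : String) : Int :=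
  let u := PySem.Str.lower url
  if pvKrsDomains.any (fun d => PySem.Str.isIn d u) then 0
  else if pvPrivacyKeywords.any (fun kw => PySem.Str.isIn kw u) then 1
  else if pvContactKeywords.any (fun kw => PySem.Str.isIn kw u) then 2
  else 3

def prioritize_urls_py_alt (urls : List String) : List String :=
  PySem.List.sorted urls pvRank

-- ===== PRECONDITION & SPEC =====
def Spec_prioritize_urls_py (urls : List String) (out : List String) : Prop := out = prioritize_urls_py_alt urls
instance (urls : List String) (out : List String) : Decidable (Spec_prioritize_urls_py urls out) := by unfold Spec_prioritize_urls_py; infer_instance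

-- ===== CLAIM (what is proved, stated in full; the proofs are below) =====
def Claim_equal_prioritize_urls_py : Prop := ∀ (urls : List String), Dom_prioritize_urls_py urls → Spec_prioritize_urls_py urls (prioritize_urls_py urls)

-- ===== LEMMAS AND PROOFS =====

-- the filter of urls with rank i
def pvTier (i : Int) (xs : List String) : List String :=
  xs.filter (fun u => decide (pvRank u = i))

lemma pvRank_cases (u : String) :
    pvRank u = 0 ∨ pvRank u = 1 ∨ pvRank u = 2 ∨ pvRank u = 3 := by
  unfold pvRank
  dsimp only
  split_ifs <;> simp

-- insertBy skips a prefix it is not inserted before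
lemma pvInsert_skip (before : String → String → Bool) (x : String) (ys zs : List String)
    (h : ∀ y ∈ ys, before x y = false) :
    PySem.List.insertBy before x (ys ++ zs) = ys ++ PySem.List.insertBy before x zs := by
  induction ys with
  | nil => simp
  | cons y ys ih =>
    have hy := h y (by simp)
    simp [PySem.List.insertBy, hy, ih (fun y hy => h y (by simp [hy]))]

-- insertBy goes in front of a list it is before everywhere
lemma pvInsert_front (before : String → String → Bool) (x : String) (zs : List String)
    (h : ∀ z ∈ zs, before x z = true) :
    PySem.List.insertBy before x zs = x :: zs := by
  cases zs with
  | nil => rfl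
  | cons z zs => simp [PySem.List.insertBy, h z (by simp)]

-- invariant of B's insertion-sort loop: the accumulator stays four rank blocks
lemma pvSortLoop (xs : List String) (a0 a1 a2 a3 : List String)
    (h0 : ∀ y ∈ a0, pvRank y = 0) (h1 : ∀ y ∈ a1, pvRank y = 1)
    (h2 : ∀ y ∈ a2, pvRank y = 2) (h3 : ∀ y ∈ a3, pvRank y = 3) :
    xs.foldl (fun acc x => PySem.List.insertBy (fun a b => decide (pvRank a < pvRank b)) x acc)
      (a0 ++ a1 ++ a2 ++ a3)
    = (a0 ++ pvTier 0 xs) ++ (a1 ++ pvTier 1 xs) ++ (a2 ++ pvTier 2 xs) ++ (a3 ++ pvTier 3 xs) := by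
  induction xs generalizing a0 a1 a2 a3 with
  | nil => simp [pvTier]
  | cons x xs ih =>
    simp only [List.foldl_cons]
    rcases pvRank_cases x with hx | hx | hx | hx
    · have hins : PySem.List.insertBy (fun a b => decide (pvRank a < pvRank b)) x
          (a0 ++ a1 ++ a2 ++ a3) = (a0 ++ [x]) ++ a1 ++ a2 ++ a3 := by
        rw [show a0 ++ a1 ++ a2 ++ a3 = a0 ++ (a1 ++ a2 ++ a3) by simp,
          pvInsert_skip _ _ _ _ (by intro y hy; simp [hx, h0 y hy]),
          pvInsert_front _ _ _ (by
            intro z hz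
            simp only [List.mem_append] at hz
            rcases hz with (hz | hz) | hz
            · simp [hx, h1 z hz]
            · simp [hx, h2 z hz]
            · simp [hx, h3 z hz])]
        simp
      rw [hins, ih (a0 ++ [x]) a1 a2 a3
        (by intro y hy; rcases List.mem_append.1 hy with h | h
            · exact h0 y h
            · simp at h; subst h; exact hx) h1 h2 h3]
      simp [pvTier, hx]
    · have hins : PySem.List.insertBy (fun a b => decide (pvRank a < pvRank b)) x
          (a0 ++ a1 ++ a2 ++ a3) = a0 ++ (a1 ++ [x]) ++ a2 ++ a3 := by
        rw [show a0 ++ a1 ++ a2 ++ a3 = (a0 ++ a1) ++ (a2 ++ a3) by simp,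
          pvInsert_skip _ _ _ _ (by
            intro y hy
            rcases List.mem_append.1 hy with h | h
            · simp [hx, h0 y h]
            · simp [hx, h1 y h]),
          pvInsert_front _ _ _ (by
            intro z hz
            rcases List.mem_append.1 hz with h | h
            · simp [hx, h2 z h]
            · simp [hx, h3 z h])]
        simp
      rw [hins, ih a0 (a1 ++ [x]) a2 a3 h0
        (by intro y hy; rcases List.mem_append.1 hy with h | h
            · exact h1 y h
            · simp at h; subst h; exact hx) h2 h3]
      simp [pvTier, hx]
    · have hins : PySem.List.insertBy (fun a b => decide (pvRank a < pvRank b)) x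
          (a0 ++ a1 ++ a2 ++ a3) = a0 ++ a1 ++ (a2 ++ [x]) ++ a3 := by
        rw [show a0 ++ a1 ++ a2 ++ a3 = (a0 ++ a1 ++ a2) ++ a3 by simp,
          pvInsert_skip _ _ _ _ (by
            intro y hy
            simp only [List.mem_append] at hy
            rcases hy with (h | h) | h
            · simp [hx, h0 y h]
            · simp [hx, h1 y h]
            · simp [hx, h2 y h]),
          pvInsert_front _ _ _ (by intro z hz; simp [hx, h3 z hz])]
        simp
      rw [hins, ih a0 a1 (a2 ++ [x]) a3 h0 h1
        (by intro y hy; rcases List.mem_append.1 hy with h | h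
            · exact h2 y h
            · simp at h; subst h; exact hx) h3]
      simp [pvTier, hx]
    · have hins : PySem.List.insertBy (fun a b => decide (pvRank a < pvRank b)) x
          (a0 ++ a1 ++ a2 ++ a3) = a0 ++ a1 ++ a2 ++ (a3 ++ [x]) := by
        rw [show a0 ++ a1 ++ a2 ++ a3 = (a0 ++ a1 ++ a2 ++ a3) ++ [] by simp,
          pvInsert_skip _ _ _ _ (by
            intro y hy
            simp only [List.mem_append] at hy
            rcases hy with ((h | h) | h) | h
            · simp [hx, h0 y h]
            · simp [hx, h1 y h]
            · simp [hx, h2 y h]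
            · simp [hx, h3 y h])]
        simp [PySem.List.insertBy]
      rw [hins, ih a0 a1 a2 (a3 ++ [x]) h0 h1 h2
        (by intro y hy; rcases List.mem_append.1 hy with h | h
            · exact h3 y h
            · simp at h; subst h; exact hx)]
      simp [pvTier, hx]

-- B equals the four rank blocks in order
lemma pvAlt_eq_tiers (urls : List String) :
    prioritize_urls_py_alt urls
    = pvTier 0 urls ++ pvTier 1 urls ++ pvTier 2 urls ++ pvTier 3 urls := by
  have := pvSortLoop urls [] [] [] [] (by simp) (by simp) (by simp) (by simp)
  simpa [prioritize_urls_py_alt, PySem.List.sorted_eq_foldl_insertBy] using this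

-- invariant of A's bucket loop
lemma pvALoop (xs : List String) (t1 t2 t3 r : List String) :
    xs.foldl pvAStep (t1, t2, t3, r)
    = (t1 ++ pvTier 0 xs, t2 ++ pvTier 1 xs, t3 ++ pvTier 2 xs, r ++ pvTier 3 xs) := by
  induction xs generalizing t1 t2 t3 r with
  | nil => simp [pvTier]
  | cons x xs ih =>
    simp only [List.foldl_cons]
    by_cases hk : pvKrsDomains.any (fun d => PySem.Str.isIn d (PySem.Str.lower x)) = true
    all_goals simp only [List.any_eq_true, PySem.Str.isIn_eq, PySem.Str.toList_lower] at hk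
    · have hr : pvRank x = 0 := by simp [pvRank, hk]
      rw [show pvAStep (t1, t2, t3, r) x = (t1 ++ [x], t2, t3, r) by simp [pvAStep, hk], ih]
      simp [pvTier, hr]
    · by_cases hp : pvPrivacyKeywords.any (fun kw => PySem.Str.isIn kw (PySem.Str.lower x)) = true
      all_goals simp only [List.any_eq_true, PySem.Str.isIn_eq, PySem.Str.toList_lower] at hp
      · have hr : pvRank x = 1 := by simp [pvRank, hk, hp]
        rw [show pvAStep (t1, t2, t3, r) x = (t1, t2 ++ [x], t3, r) by
          simp [pvAStep, hk, hp], ih]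
        simp [pvTier, hr]
      · by_cases hc : pvContactKeywords.any (fun kw => PySem.Str.isIn kw (PySem.Str.lower x)) = true
        all_goals simp only [List.any_eq_true, PySem.Str.isIn_eq, PySem.Str.toList_lower] at hc
        · have hr : pvRank x = 2 := by
            simp [pvRank, hk, hp, hc]
          rw [show pvAStep (t1, t2, t3, r) x = (t1, t2, t3 ++ [x], r) by
            simp [pvAStep, hk, hp, hc], ih]
          simp [pvTier, hr]
        · have hr : pvRank x = 3 := by
            simp [pvRank, hk, hp, hc]
          rw [show pvAStep (t1, t2, t3, r) x = (t1, t2, t3, r ++ [x]) by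
            simp [pvAStep, hk, hp, hc], ih]
          simp [pvTier, hr]

-- ===== VERDICT (by name: the statement is the Claim_ definition above) =====
theorem prioritize_urls_py_spec : Claim_equal_prioritize_urls_py := by
  intro urls _
  show prioritize_urls_py urls = prioritize_urls_py_alt urls
  rw [pvAlt_eq_tiers]
  simp [prioritize_urls_py, pvALoop urls [] [] [] []]
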